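-- pv_equiv track=rewrite | github.com/dimang777/Insight | scripts/scrape/lcbo_scrape_tools.py | find_item_loc
-- ===== SOURCE A (Python) =====
-- def find_item_loc(keyword, texts):
--     # Find the index of an item in a list of texts
--     # input: keyword, list of texts
--     # output: the index of non-newline after the keyword
--     item_idx = -1
--     for idx, text in enumerate(texts):
--         if item_idx < 0:
--             if 0 <= text.find(keyword):
--                 item_idx = idx
--         else:
--             item_idx = item_idx + 1
--             if text != '\n':
--                 break
--
--     return item_idx
-- ===== SOURCE B (Python) =====
-- def find_item_loc(keyword, texts):
--     # Declarative min-over-candidates formulation: the answer is the least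
--     # matching index, then the least later non-newline index (default n-1).
--     n = len(texts)
--     start = min((i for i, t in enumerate(texts) if 0 <= t.find(keyword)), default=-1)
--     if start < 0:
--         return -1
--     return min((j for j in range(start + 1, n) if texts[j] != '\n'), default=n - 1)
-- ===== Notes on version B (the rewrite author's own statement) =====
-- stated objective: alternative
-- what changed: Replaces A's stateful flag-controlled loop (item_idx doubling as match flag and running counter, with break) with a declarative characterisation: the minimum of the set of matching indices, then the minimum of the later non-newline indices with an explicit n-1 default.
import Mathlib
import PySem

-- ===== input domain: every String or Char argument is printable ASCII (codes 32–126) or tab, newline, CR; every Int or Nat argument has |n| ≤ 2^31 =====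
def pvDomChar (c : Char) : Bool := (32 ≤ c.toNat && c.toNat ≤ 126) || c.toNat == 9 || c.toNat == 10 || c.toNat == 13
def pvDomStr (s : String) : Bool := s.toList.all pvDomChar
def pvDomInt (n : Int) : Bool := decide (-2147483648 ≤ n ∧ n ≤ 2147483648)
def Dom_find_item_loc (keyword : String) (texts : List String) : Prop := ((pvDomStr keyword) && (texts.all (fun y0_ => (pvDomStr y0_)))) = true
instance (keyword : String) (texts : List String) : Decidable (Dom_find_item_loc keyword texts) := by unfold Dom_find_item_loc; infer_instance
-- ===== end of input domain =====

-- B replaces A's stateful flag-controlled loop by a declarative characterisation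
-- (min of the matching indices, then min of the later non-newline indices); same values.

-- ===== PORT A =====
-- A's for-loop with break, as structural recursion over texts carrying (idx, item_idx).
def pvLoopA (keyword : String) (idx : Int) (item_idx : Int) : List String → Int
  | [] => item_idx
  | text :: rest =>
    if item_idx < 0 then
      if 0 ≤ PySem.Str.find text keyword then pvLoopA keyword (idx + 1) idx rest
      else pvLoopA keyword (idx + 1) item_idx rest
    else
      if text ≠ "\n" then item_idx + 1    -- break
      else pvLoopA keyword (idx + 1) (item_idx + 1) rest

def find_item_loc (keyword : String) (texts : List String) : Int :=
  pvLoopA keyword 0 (-1) texts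

-- ===== PORT B =====
-- min(gen, default) over the filtered enumerate / range, as in Source B.
-- texts[j] is ported as pyGetD texts j "": every j drawn from range(start+1, n) is in
-- range, so the default is never consulted and the port is exact.
def find_item_loc_alt (keyword : String) (texts : List String) : Int :=
  let n : Int := (texts.length : Int)
  let start :=
    (PySem.List.min?
      (((PySem.List.enumerate texts 0).filter
          (fun p => decide (0 ≤ PySem.Str.find p.2 keyword))).map (fun p => p.1))
      (fun x => x)).getD (-1)
  if start < 0 then -1
  else
    (PySem.List.min?
      ((PySem.List.pyRange (start + 1) n 1).filter
        (fun j => decide (PySem.List.pyGetD texts j "" ≠ "\n")))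
      (fun x => x)).getD (n - 1)

-- ===== PRECONDITION & SPEC =====
def Spec_find_item_loc (keyword : String) (texts : List String) (out : Int) : Prop := out = find_item_loc_alt keyword texts
instance (keyword : String) (texts : List String) (out : Int) : Decidable (Spec_find_item_loc keyword texts out) := by unfold Spec_find_item_loc; infer_instance

-- ===== CLAIM (what is proved, stated in full; the proofs are below) =====
def Claim_equal_find_item_loc : Prop := ∀ (keyword : String) (texts : List String), Dom_find_item_loc keyword texts → Spec_find_item_loc keyword texts (find_item_loc keyword texts)

-- ===== LEMMAS AND PROOFS =====

-- proof-only helper: first index (from idx) whose text contains the keyword, -1 if none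
def pvFindStart (keyword : String) (idx : Int) : List String → Int
  | [] => -1
  | text :: rest =>
    if 0 ≤ PySem.Str.find text keyword then idx else pvFindStart keyword (idx + 1) rest

-- proof-only helper: first j (counting from j) whose text ≠ "\n"; fallback len - 1
def pvScanAfter (len : Int) (j : Int) : List String → Int
  | [] => len - 1
  | t :: rest => if t ≠ "\n" then j else pvScanAfter len (j + 1) rest

theorem foldl_min_eq_self (t : List Int) (x : Int) (h : ∀ y ∈ t, x ≤ y) :
    t.foldl min x = x := by
  induction t with
  | nil => rfl
  | cons a t ih =>
    simp only [List.foldl_cons]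
    rw [min_eq_left (h a (by simp))]
    exact ih (fun y hy => h y (by simp [hy]))

theorem pvFindStart_cases (keyword : String) (l : List String) (idx : Int) :
    pvFindStart keyword idx l = -1 ∨ idx ≤ pvFindStart keyword idx l := by
  induction l generalizing idx with
  | nil => left; rfl
  | cons t rest ih =>
    simp only [pvFindStart]
    split
    · right; omega
    · rcases ih (idx + 1) with h | h
      · left; exact h
      · right; omega

-- phase 1 of B equals pvFindStart (every index in the filtered enumerate is ≥ s,
-- so min picks the head, which is the first match)
theorem minEnum_eq_findStart (keyword : String) (l : List String) :
    ∀ s : Int, 0 ≤ s →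
      (PySem.List.min?
        (((PySem.List.enumerate l s).filter
            (fun p => decide (0 ≤ PySem.Str.find p.2 keyword))).map (fun p => p.1))
        (fun x => x)).getD (-1) = pvFindStart keyword s l := by
  induction l with
  | nil => intro s _; simp [PySem.List.enumerate_nil, PySem.List.min?, pvFindStart]
  | cons t rest ih =>
    intro s hs
    rw [PySem.List.enumerate_cons]
    by_cases h : 0 ≤ PySem.Str.find t keyword
    · -- head matches: min of s :: tail = s
      rw [List.filter_cons_of_pos (by simpa using h)]
      simp only [List.map_cons]
      rw [PySem.List.min?_id_cons]
      have hlow : ∀ y ∈ ((PySem.List.enumerate rest (s + 1)).filter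
          (fun p => decide (0 ≤ PySem.Str.find p.2 keyword))).map (fun p => p.1), s ≤ y := by
        intro y hy
        rcases List.mem_map.mp hy with ⟨p, hp, rfl⟩
        rcases (PySem.List.mem_enumerate_iff _ _ _).mp (List.mem_filter.mp hp).1 with ⟨k, _, rfl⟩
        simp
        omega
      rw [foldl_min_eq_self _ _ hlow]
      simp only [pvFindStart]
      rw [if_pos h]
      rfl
    · rw [List.filter_cons_of_neg (by simpa using h)]
      rw [ih (s + 1) (by omega)]
      simp only [pvFindStart]
      rw [if_neg h]

-- phase 2 of B equals pvScanAfter on the dropped suffix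
theorem minRange_eq_scanAfter (texts : List String) :
    ∀ (k : Nat) (j : Int), 0 ≤ j → (texts.length : Int) - j ≤ (k : Int) →
      (PySem.List.min?
        ((PySem.List.pyRange j (texts.length : Int) 1).filter
          (fun i => decide (PySem.List.pyGetD texts i "" ≠ "\n")))
        (fun x => x)).getD ((texts.length : Int) - 1)
      = pvScanAfter (texts.length : Int) j (texts.drop j.toNat) := by
  intro k
  induction k with
  | zero =>
    intro j hj hk
    rw [PySem.List.pyRange_one_eq_nil (by omega)]
    rw [List.drop_eq_nil_of_le (by omega)]
    simp [PySem.List.min?, pvScanAfter]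
  | succ k ih =>
    intro j hj hk
    by_cases hjn : (texts.length : Int) ≤ j
    · rw [PySem.List.pyRange_one_eq_nil hjn]
      rw [List.drop_eq_nil_of_le (by omega)]
      simp [PySem.List.min?, pvScanAfter]
    · replace hjn : j < (texts.length : Int) := by omega
      have hjlt : j.toNat < texts.length := by omega
      rw [PySem.List.pyRange_one_cons hjn]
      rw [List.drop_eq_getElem_cons hjlt]
      have hget : PySem.List.pyGetD texts j "" = texts[j.toNat] := by
        rw [PySem.List.pyGetD_of_nonneg texts "" hj, List.getD_eq_getElem _ _ hjlt]
      by_cases h : texts[j.toNat] = "\n"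
      · -- texts[j] = "\n": skip it and recurse
        rw [List.filter_cons_of_neg (by simp [hget, h])]
        rw [pvScanAfter, if_neg (by simp [h])]
        have := ih (j + 1) (by omega) (by omega)
        rw [show (j + 1).toNat = j.toNat + 1 by omega] at this
        exact this
      · -- texts[j] ≠ "\n": min of j :: tail = j
        rw [List.filter_cons_of_pos (by simp [hget, h])]
        rw [PySem.List.min?_id_cons]
        have hlow : ∀ y ∈ (PySem.List.pyRange (j + 1) (texts.length : Int) 1).filter
            (fun i => decide (PySem.List.pyGetD texts i "" ≠ "\n")), j ≤ y := by
          intro y hy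
          have := (PySem.List.mem_pyRange_one.mp (List.mem_filter.mp hy).1).1
          omega
        rw [foldl_min_eq_self _ _ hlow]
        rw [pvScanAfter, if_pos (by simp [h])]
        rfl

-- post-match phase of A: with item_idx = idx - 1, the rest of A's loop is pvScanAfter
theorem pvLoopA_post (keyword : String) (l : List String) (idx : Int) (h : 1 ≤ idx) :
    pvLoopA keyword idx (idx - 1) l = pvScanAfter (idx + l.length) idx l := by
  induction l generalizing idx with
  | nil => simp [pvLoopA, pvScanAfter]
  | cons t rest ih =>
    simp only [pvLoopA, pvScanAfter, List.length_cons]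
    have hlt : ¬ idx - 1 < 0 := by omega
    rw [if_neg hlt]
    split
    · omega
    · rw [show idx - 1 + 1 = idx by omega]
      have := ih (idx + 1) (by omega)
      rw [show idx + 1 - 1 = idx by omega] at this
      rw [this]
      congr 1
      push_cast
      omega

-- pre-match phase of A via pvFindStart / pvScanAfter (general starting index)
theorem pvLoopA_pre (keyword : String) (l : List String) (idx : Int) (h : 0 ≤ idx) :
    pvLoopA keyword idx (-1) l =
      if pvFindStart keyword idx l = -1 then -1
      else pvScanAfter (idx + l.length)
            (pvFindStart keyword idx l + 1)
            (l.drop (pvFindStart keyword idx l + 1 - idx).toNat) := by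
  induction l generalizing idx with
  | nil => simp [pvLoopA, pvFindStart]
  | cons t rest ih =>
    simp only [pvLoopA, pvFindStart, List.length_cons]
    rw [if_pos (by omega : (-1 : Int) < 0)]
    split
    · rw [if_neg (by omega : ¬ idx = -1)]
      have : pvLoopA keyword (idx + 1) idx rest = pvScanAfter (idx + 1 + rest.length) (idx + 1) rest := by
        have := pvLoopA_post keyword rest (idx + 1) (by omega)
        rw [show idx + 1 - 1 = idx by omega] at this
        exact this
      rw [this, show (idx + 1 - idx).toNat = 1 by omega]
      simp only [List.drop_succ_cons, List.drop_zero]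
      congr 1
      push_cast
      omega
    · rw [ih (idx + 1) (by omega)]
      rcases pvFindStart_cases keyword rest (idx + 1) with hc | hc
      · rw [hc]; simp
      · set s := pvFindStart keyword (idx + 1) rest with hs
        rw [if_neg (by omega : ¬ s = -1), if_neg (by omega : ¬ s = -1)]
        rw [show (s + 1 - idx).toNat = (s + 1 - (idx + 1)).toNat + 1 by omega]
        simp only [List.drop_succ_cons]
        congr 1
        push_cast
        omega

-- ===== VERDICT (by name: the statement is the Claim_ definition above) =====
theorem find_item_loc_spec : Claim_equal_find_item_loc := by
  intro keyword texts _
  unfold Spec_find_item_loc find_item_loc find_item_loc_alt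
  rw [minEnum_eq_findStart keyword texts 0 le_rfl]
  have hA := pvLoopA_pre keyword texts 0 le_rfl
  simp only [zero_add] at hA
  rw [hA]
  rcases pvFindStart_cases keyword texts 0 with hc | hc
  · rw [hc]; norm_num
  · set s := pvFindStart keyword 0 texts with hs
    rw [if_neg (by omega : ¬ s = -1), if_neg (by omega : ¬ s < 0)]
    rw [minRange_eq_scanAfter texts (texts.length) (s + 1) (by omega) (by omega)]
    rw [show s + 1 - 0 = s + 1 by omega]
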